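-- pv_equiv track=rewrite | github.com/sladen/rollingstocknumber | rollingstocknumber.py | validate_uic_checksum
-- ===== SOURCE A (Python) =====
-- def validate_uic_checksum(uic, validate_length=True, validate_checksum=True):
--     """Validate and return checksum digit from a UIC/RIV/RIC/ENV rolling stock number.
--
--     Args:
--         uic (str): rolling stuck number as string, can include UIC letters/punctuation
--     Kwargs:
--         validate_length (bool): validate digit count (default: True)
--         validate_checksum (bool): validate checksum (default: True)
--     Returns:
--         checksum digit `c` as integer between 0 and 9
--     Raises:
--         IndexError: incorrect number of digits supplied (if validate_length)
--         ValueError: mismatching checksum detected (if validate_checksum)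
--
--     Can be used to calculate a checksum from scratch by passing an additional digit
--     and explicitly turning off the normal validation step:
--
--     >>> validate_uic_checksum('123-456' + '0', validate_checksum=False)
--     6
--
--     Because zero is a validate checksum digit, avoid comparing for success:
--     >>> if validate_uic_checksum('000-000-0'): # Incorrect 10% of the time
--
--     Implementation:
--     Digits `d` are maximum of twelve numbers, extracted from righthand side.
--     Check sum `c` of digits with alterate numbers multipled by two,
--         subtracted from next multiple of ten.
--     """
--     assert isinstance(uic, str)
--
--     d = list(map(int, filter(str.isdigit, uic)))[-12:]
--     c = -sum(d[:-1] + [(list(range(5)) + list(range(-4,1)))[i] for i in d[-2::-2]]) % 10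
--
--     if validate_length and not len(d) in (7,8,12):
--         raise IndexError('Invalid number of digits in "%s", digits "%s" (%d counted; 7,8,12 expected)' % (uic, ''.join(map(str,d)), len(d)))
--     if validate_checksum and not c is d[-1]:
--         raise ValueError('Invalid checksum for "%s", digits %s, calculated last digit checksum as %d?' % (uic, ''.join(map(str,d)), c))
--     return c
-- ===== SOURCE B (Python) =====
-- def validate_uic_checksum(uic, validate_length=True, validate_checksum=True):
--     """Validate and return checksum digit from a UIC/RIV/RIC/ENV rolling stock number."""
--     assert isinstance(uic, str)
--
--     d = [int(ch) for ch in uic if ch.isdigit()][-12:]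
--
--     total = 0
--     for i, dig in enumerate(reversed(d[:-1])):
--         if i % 2 == 0:
--             dbl = 2 * dig
--             total += dbl - 9 if dbl > 9 else dbl
--         else:
--             total += dig
--     c = (10 - total % 10) % 10
--
--     if validate_length and len(d) not in (7, 8, 12):
--         raise IndexError('Invalid number of digits in "%s", digits "%s" (%d counted; 7,8,12 expected)' % (uic, ''.join(map(str, d)), len(d)))
--     if validate_checksum and c != d[-1]:
--         raise ValueError('Invalid checksum for "%s", digits %s, calculated last digit checksum as %d?' % (uic, ''.join(map(str, d)), c))
--     return c
-- ===== Notes on version B (the rewrite author's own statement) =====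
-- stated objective: idiomatic
-- what changed: Replaced A's lookup-table-plus-strided-slice one-liner (sum of d[:-1] concatenated with table[i] for i in d[-2::-2], negated mod 10) by a single explicit Luhn-style loop over enumerate(reversed(d[:-1])) that doubles even positions and subtracts 9 when the double exceeds 9, then takes (10 - total % 10) % 10.
import Mathlib
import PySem

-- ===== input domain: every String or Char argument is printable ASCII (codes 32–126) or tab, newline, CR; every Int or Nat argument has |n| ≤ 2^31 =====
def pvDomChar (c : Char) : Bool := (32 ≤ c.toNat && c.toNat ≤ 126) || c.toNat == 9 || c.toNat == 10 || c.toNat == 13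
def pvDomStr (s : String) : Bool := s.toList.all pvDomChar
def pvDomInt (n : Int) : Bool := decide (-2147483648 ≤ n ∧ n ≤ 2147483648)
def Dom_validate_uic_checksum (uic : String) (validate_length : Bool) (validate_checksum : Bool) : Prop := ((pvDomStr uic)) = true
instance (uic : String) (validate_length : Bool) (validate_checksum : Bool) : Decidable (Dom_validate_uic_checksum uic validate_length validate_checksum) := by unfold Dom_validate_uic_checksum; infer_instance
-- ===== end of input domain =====

-- B replaces A's lookup-table comprehension over the strided slice d[-2::-2] by a single explicit
-- Luhn-style loop over enumerate(reversed(d[:-1])) doubling even positions (objective: idiomatic).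
-- The equivalence is about the RETURN value on Pre_ (where A raises no exception).

-- ===== PORT A =====
-- table = list(range(5)) + list(range(-4,1))
def uicTable : List Int := PySem.List.pyRange 0 5 1 ++ PySem.List.pyRange (-4) 1 1

def validate_uic_checksum (uic : String) (validate_length : Bool) (validate_checksum : Bool) : Int :=
  -- d = list(map(int, filter(str.isdigit, uic)))[-12:]  (int(ch) on an ASCII digit char is ch.toNat - 48; exact on Dom)
  let d : List Int := PySem.List.slice ((uic.toList.filter PySem.Chars.isdigit).map (fun ch => (ch.toNat : Int) - 48)) (some (-12)) none
  -- c = -sum(d[:-1] + [table[i] for i in d[-2::-2]]) % 10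
  -- slice? step is the literal -2 ≠ 0, so it is never none; table index i is a digit 0–9, always in range
  let c : Int := PySem.Int.mod (-(PySem.List.slice d none (some (-1)) ++
      ((PySem.List.slice? d (some (-2)) none (-2)).getD []).map (fun i => PySem.List.pyGetD uicTable i 0)).sum) 10
  -- the two 'raise' branches of A fire exactly on the complement of Pre_validate_uic_checksum; on Pre_ A returns c
  c

-- ===== PORT B =====
def validate_uic_checksum_alt (uic : String) (validate_length : Bool) (validate_checksum : Bool) : Int :=
  let d : List Int := PySem.List.slice ((uic.toList.filter PySem.Chars.isdigit).map (fun ch => (ch.toNat : Int) - 48)) (some (-12)) none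
  -- for i, dig in enumerate(reversed(d[:-1])): double the even positions, subtracting 9 when the double exceeds 9
  let total : Int := (PySem.List.enumerate (PySem.List.slice d none (some (-1))).reverse 0).foldl
    (fun acc p => if PySem.Int.mod p.1 2 == 0 then
        acc + (if 2 * p.2 > 9 then 2 * p.2 - 9 else 2 * p.2)
      else acc + p.2) 0
  let c : Int := PySem.Int.mod (10 - PySem.Int.mod total 10) 10
  -- same two validation raises as A (outside Pre_); on Pre_ B returns c
  c

-- ===== PRECONDITION & SPEC =====
-- spec-level helpers for Pre_ (independent of both ports)
def pvUicDigits (uic : String) : List Int :=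
  let l := (uic.toList.filter PySem.Chars.isdigit).map (fun ch => (ch.toNat : Int) - 48)
  l.drop (l.length - 12)

def pvLuhnSum : List Int → Int
  | [] => 0
  | [x] => if 2 * x > 9 then 2 * x - 9 else 2 * x
  | x :: y :: t => (if 2 * x > 9 then 2 * x - 9 else 2 * x) + y + pvLuhnSum t

def pvUicCheck (d : List Int) : Int := (10 - (pvLuhnSum d.dropLast.reverse) % 10) % 10

-- Pre_ excludes exactly the inputs where A raises: a digit count outside {7,8,12} when
-- validate_length, and (when validate_checksum) an empty digit list (IndexError at d[-1])
-- or a mismatching checksum digit (ValueError).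
def Pre_validate_uic_checksum (uic : String) (validate_length : Bool) (validate_checksum : Bool) : Prop :=
  (validate_length = true → (pvUicDigits uic).length = 7 ∨ (pvUicDigits uic).length = 8 ∨ (pvUicDigits uic).length = 12) ∧
  (validate_checksum = true → (pvUicDigits uic).getLast? = some (pvUicCheck (pvUicDigits uic)))
instance (uic : String) (validate_length : Bool) (validate_checksum : Bool) : Decidable (Pre_validate_uic_checksum uic validate_length validate_checksum) := by unfold Pre_validate_uic_checksum; infer_instance

def pvWitness_validate_uic_checksum : String × Bool × Bool := ("000-000-0", true, true)

def Spec_validate_uic_checksum (uic : String) (validate_length : Bool) (validate_checksum : Bool) (out : Int) : Prop := out = validate_uic_checksum_alt uic validate_length validate_checksum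
instance (uic : String) (validate_length : Bool) (validate_checksum : Bool) (out : Int) : Decidable (Spec_validate_uic_checksum uic validate_length validate_checksum out) := by unfold Spec_validate_uic_checksum; infer_instance

-- ===== CLAIM (what is proved, stated in full; the proofs are below) =====
def Claim_equal_validate_uic_checksum : Prop := ∀ (uic : String) (validate_length : Bool) (validate_checksum : Bool), Dom_validate_uic_checksum uic validate_length validate_checksum → Pre_validate_uic_checksum uic validate_length validate_checksum → Spec_validate_uic_checksum uic validate_length validate_checksum (validate_uic_checksum uic validate_length validate_checksum)

-- ===== LEMMAS AND PROOFS =====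

-- the elements of d[-2::-2] in order: every second element of reverse (dropLast d)
def pvEvens {α : Type} : List α → List α
  | [] => []
  | [x] => [x]
  | x :: _ :: t => x :: pvEvens t

theorem pvEvens_length {α : Type} (l : List α) : (pvEvens l).length = (l.length + 1) / 2 := by
  induction l using pvEvens.induct <;> simp [pvEvens, *] <;> omega

theorem pvEvens_getElem {α : Type} (l : List α) (k : Nat) (hk : k < (pvEvens l).length)
    (h2 : 2 * k < l.length) : (pvEvens l)[k] = l[2 * k] := by
  induction l using pvEvens.induct generalizing k with
  | case1 => simp [pvEvens] at hk
  | case2 x => simp [pvEvens] at hk; subst hk; simp [pvEvens]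
  | case3 x y t ih =>
      cases k with
      | zero => simp [pvEvens]
      | succ m =>
          have := pvEvens_length t
          simp only [pvEvens, List.getElem_cons_succ] at hk ⊢
          have h2' : 2 * m < t.length := by
            simp at h2; omega
          rw [ih m (by omega) h2']
          have : 2 * (m + 1) = (2 * m) + 1 + 1 := by omega
          simp [this]

theorem pvEvens_mem {α : Type} (l : List α) (x : α) (hx : x ∈ pvEvens l) : x ∈ l := by
  induction l using pvEvens.induct with
  | case1 => simpa [pvEvens] using hx
  | case2 y => simpa [pvEvens] using hx
  | case3 y z t ih =>
      simp only [pvEvens, List.mem_cons] at hx ⊢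
      rcases hx with h | h
      · exact Or.inl h
      · exact Or.inr (Or.inr (ih h))

-- d[-2::-2] as a PySem slice? equals pvEvens of reverse (dropLast d)
theorem pvSliceA {α : Type} (d : List α) :
    (PySem.List.slice? d (some (-2)) none (-2)).getD [] = pvEvens d.dropLast.reverse := by
  simp only [PySem.List.slice?, PySem.List.sliceIndices]
  norm_num
  by_cases hd : 1 < d.length
  · rw [if_pos hd]
    rcases d with _ | ⟨a, t⟩
    · simp at hd
    · set l : List α := a :: t with hl
      have hn : 2 ≤ l.length := by omega
      have hmax : max (-2 + (l.length : Int)) (-1) = (l.length : Int) - 2 := by omega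
      rw [hmax]
      have harg : ((l.length : Int) - 2 + 1 + 2 - 1) = (l.length : Int) := by ring
      rw [harg]
      have hcount : (((l.length : Int)) / 2).toNat = l.length / 2 := by omega
      rw [hcount]
      have hfm : ∀ k ∈ List.range (l.length / 2),
          l[((l.length : Int) - 2 + -(2 * (k : Int))).toNat]? = some (l.getD (l.length - 2 - 2 * k) a) := by
        intro k hk
        rw [List.mem_range] at hk
        have hidx : ((l.length : Int) - 2 + -(2 * (k : Int))).toNat = l.length - 2 - 2 * k := by omega
        rw [hidx]
        have hlt : l.length - 2 - 2 * k < l.length := by omega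
        rw [List.getElem?_eq_getElem hlt, List.getD_eq_getElem l a hlt]
      rw [List.filterMap_congr hfm]
      rw [show (fun k => some (l.getD (l.length - 2 - 2 * k) a)) = some ∘ (fun k => l.getD (l.length - 2 - 2 * k) a) from rfl, List.filterMap_eq_map]
      apply List.ext_getElem
      · simp [pvEvens_length]; omega
      · intro k h1 h2
        have hk : k < l.length / 2 := by simpa using h1
        simp only [List.getElem_map, List.getElem_range]
        have h2k : 2 * k < l.dropLast.reverse.length := by simp; omega
        rw [pvEvens_getElem _ _ h2 h2k]
        rw [List.getElem_reverse]
        rw [List.getElem_dropLast]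
        rw [List.getD_eq_getElem l a (by omega)]
        congr 1
        simp
        omega
  · rw [if_neg hd]
    rcases d with _ | ⟨a, _ | ⟨b, t⟩⟩
    · simp [pvEvens]
    · simp [pvEvens]
    · simp at hd

-- B's loop, recursively
def pvGo (s : Int) : List Int → Int
  | [] => 0
  | x :: t => (if PySem.Int.mod s 2 == 0 then (if 2 * x > 9 then 2 * x - 9 else 2 * x) else x) + pvGo (s + 1) t

theorem pvFoldlEnum (e : List Int) (acc s : Int) :
    (PySem.List.enumerate e s).foldl
      (fun acc p => if PySem.Int.mod p.1 2 == 0 then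
          acc + (if 2 * p.2 > 9 then 2 * p.2 - 9 else 2 * p.2)
        else acc + p.2) acc = acc + pvGo s e := by
  induction e generalizing acc s with
  | nil => simp [PySem.List.enumerate_nil, pvGo]
  | cons x t ih =>
      rw [PySem.List.enumerate_cons]
      simp only [List.foldl_cons, ih, pvGo]
      split <;> ring

theorem pvGo_add_two (t : List Int) (s : Int) : pvGo (s + 2) t = pvGo s t := by
  induction t generalizing s with
  | nil => rfl
  | cons x t ih =>
      have hm : PySem.Int.mod (s + 2) 2 = PySem.Int.mod s 2 := by
        rw [PySem.Int.mod_eq_emod_of_pos (by omega), PySem.Int.mod_eq_emod_of_pos (by omega)]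
        omega
      simp only [pvGo, hm]
      have : s + 2 + 1 = s + 1 + 2 := by ring
      rw [this, ih]

theorem pvGo_zero (e : List Int) :
    pvGo 0 e = e.sum + ((pvEvens e).map (fun x => (if 2 * x > 9 then 2 * x - 9 else 2 * x) - x)).sum := by
  induction e using pvEvens.induct with
  | case1 => simp [pvGo, pvEvens]
  | case2 x =>
      have h0 : (PySem.Int.mod 0 2 == 0) = true := by decide
      simp only [pvGo, pvEvens, h0, if_true, List.map_cons, List.map_nil, List.sum_cons,
        List.sum_nil]
      split <;> ring
  | case3 x y t ih =>
      have h0 : (PySem.Int.mod 0 2 == 0) = true := by decide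
      have h1 : (PySem.Int.mod (0 + 1) 2 == 0) = false := by decide
      have e2 : (0 : Int) + 1 + 1 = 0 + 2 := by ring
      simp only [pvGo, h0, h1, if_true, if_false, Bool.false_eq_true, e2, pvGo_add_two]
      simp only [pvEvens, List.map_cons, List.sum_cons, ih]
      split <;> ring

theorem pvTable_eq (x : Int) (h0 : 0 ≤ x) (h9 : x ≤ 9) :
    PySem.List.pyGetD uicTable x 0 = (if 2 * x > 9 then 2 * x - 9 else 2 * x) - x := by
  interval_cases x <;> decide

theorem pv_core (d : List Int) (hd : ∀ x ∈ d, 0 ≤ x ∧ x ≤ 9) :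
    PySem.Int.mod (-(PySem.List.slice d none (some (-1)) ++
        ((PySem.List.slice? d (some (-2)) none (-2)).getD []).map (fun i => PySem.List.pyGetD uicTable i 0)).sum) 10
    = PySem.Int.mod (10 - PySem.Int.mod ((PySem.List.enumerate (PySem.List.slice d none (some (-1))).reverse 0).foldl
        (fun acc p => if PySem.Int.mod p.1 2 == 0 then
            acc + (if 2 * p.2 > 9 then 2 * p.2 - 9 else 2 * p.2)
          else acc + p.2) 0) 10) 10 := by
  rw [PySem.List.slice_to_neg_one, pvSliceA, pvFoldlEnum, pvGo_zero]
  have hmap : (pvEvens d.dropLast.reverse).map (fun i => PySem.List.pyGetD uicTable i 0)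
      = (pvEvens d.dropLast.reverse).map (fun x => (if 2 * x > 9 then 2 * x - 9 else 2 * x) - x) := by
    apply List.map_congr_left
    intro x hx
    have hxd : x ∈ d := List.dropLast_subset d (List.mem_reverse.mp (pvEvens_mem _ _ hx))
    exact pvTable_eq x (hd x hxd).1 (hd x hxd).2
  rw [hmap]
  have hsum : (d.dropLast).sum = (d.dropLast.reverse).sum := (List.sum_reverse _).symm
  rw [List.sum_append, hsum]
  rw [PySem.Int.mod_eq_emod_of_pos (by omega), PySem.Int.mod_eq_emod_of_pos (by omega),
      PySem.Int.mod_eq_emod_of_pos (by omega)]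
  omega

-- ===== VERDICT (by name: the statement is the Claim_ definition above) =====
theorem validate_uic_checksum_spec : Claim_equal_validate_uic_checksum := by
  intro uic vl vc _ _
  unfold Spec_validate_uic_checksum
  dsimp only [validate_uic_checksum, validate_uic_checksum_alt]
  refine pv_core _ ?_
  intro x hx
  have hx' := PySem.List.mem_of_mem_slice _ _ _ hx
  simp only [List.mem_map, List.mem_filter] at hx'
  obtain ⟨c, ⟨_, hdig⟩, rfl⟩ := hx'
  simp only [PySem.Chars.isdigit, Bool.and_eq_true, decide_eq_true_eq] at hdig
  have h0 : ('0' : Char).toNat ≤ c.toNat := Char.le_def.mp hdig.1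
  have h9 : c.toNat ≤ ('9' : Char).toNat := Char.le_def.mp hdig.2
  have e0 : ('0' : Char).toNat = 48 := rfl
  have e9 : ('9' : Char).toNat = 57 := rfl
  rw [e0] at h0; rw [e9] at h9
  constructor <;> omega
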